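-- pv_equiv track=rewrite | github.com/nazar-khimin/data-test-tasks | sprint_3_regular_expressions/3.1.py | double_string_v3
-- ===== SOURCE A (Python) =====
-- def double_string_v3(strings):
--     count = 0
--     strings_set = set(strings)  # Use a set for fast lookup
--
--     for s in strings:
--         for i in range(1, len(s)):
--             # Split the string into two parts
--             left, right = s[:i], s[i:]
--             if left in strings_set and right in strings_set:
--                 count += 1
--                 break  # Avoid double-counting this string
--
--     return count
-- ===== SOURCE B (Python) =====
-- def double_string_v3(strings):
--     parts = {t for t in strings if t}
--     composites = {a + b for a in parts for b in parts}
--     return sum(s in composites for s in strings)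
-- ===== Notes on version B (the rewrite author's own statement) =====
-- stated objective: alternative
-- what changed: B never scans split positions: it builds the set of all concatenations of two nonempty set members once, then counts the input strings that belong to that composite set.
import Mathlib
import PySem

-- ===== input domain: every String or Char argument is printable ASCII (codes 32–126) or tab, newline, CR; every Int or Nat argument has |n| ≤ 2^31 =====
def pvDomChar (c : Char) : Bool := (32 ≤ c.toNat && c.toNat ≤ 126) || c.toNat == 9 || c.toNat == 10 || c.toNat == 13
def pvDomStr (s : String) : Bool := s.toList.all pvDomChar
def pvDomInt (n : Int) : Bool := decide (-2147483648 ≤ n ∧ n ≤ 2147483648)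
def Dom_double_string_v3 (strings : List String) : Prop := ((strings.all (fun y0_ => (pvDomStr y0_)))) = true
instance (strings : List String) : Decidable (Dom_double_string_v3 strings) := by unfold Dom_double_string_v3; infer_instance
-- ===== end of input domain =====

-- B builds the set of all concatenations of two nonempty set members once and counts
-- membership, instead of A's scan over every split position of each string — an
-- alternative algorithm, not claimed faster on the measured inputs.

-- ===== PORT A =====
-- the inner 'for i in range(1, len(s)): … break' loop: returns true at the first split that works
def pvSplitLoop (S : PySem.Set String) (s : String) : List Int → Bool
  | [] => false
  | i :: rest =>
    if PySem.Set.contains S (PySem.Str.slice s none (some i)) &&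
       PySem.Set.contains S (PySem.Str.slice s (some i) none) then
      true
    else pvSplitLoop S s rest

def double_string_v3 (strings : List String) : Int :=
  let strings_set : PySem.Set String := PySem.Set.ofList strings
  strings.foldl
    (fun count s =>
      if pvSplitLoop strings_set s (PySem.List.pyRange 1 (PySem.Str.len s) 1) then count + 1
      else count)
    0

-- ===== PORT B =====
-- Source B: parts = {t for t in strings if t}; composites = {a + b for a in parts for b in parts};
-- return sum(s in composites for s in strings)
def double_string_v3_alt (strings : List String) : Int :=
  let parts : PySem.Set String := PySem.Set.ofList (strings.filter (fun t => t != ""))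
  let composites : PySem.Set String :=
    PySem.Set.ofList (parts.flatMap (fun a => parts.map (fun b => a ++ b)))
  ((strings.countP (fun s => PySem.Set.contains composites s) : Nat) : Int)

-- ===== PRECONDITION & SPEC =====
def Spec_double_string_v3 (strings : List String) (out : Int) : Prop := out = double_string_v3_alt strings
instance (strings : List String) (out : Int) : Decidable (Spec_double_string_v3 strings out) := by unfold Spec_double_string_v3; infer_instance

-- ===== CLAIM (what is proved, stated in full; the proofs are below) =====
def Claim_equal_double_string_v3 : Prop := ∀ (strings : List String), Dom_double_string_v3 strings → Spec_double_string_v3 strings (double_string_v3 strings)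

-- ===== LEMMAS AND PROOFS =====

-- A's break-on-first-hit loop is List.any of the same condition
theorem pvSplitLoop_eq_any (S : PySem.Set String) (s : String) (l : List Int) :
    pvSplitLoop S s l =
      l.any (fun i =>
        PySem.Set.contains S (PySem.Str.slice s none (some i)) &&
        PySem.Set.contains S (PySem.Str.slice s (some i) none)) := by
  induction l with
  | nil => rfl
  | cons i rest ih =>
    rw [pvSplitLoop, List.any_cons, ← ih]
    cases h : (PySem.Set.contains S (PySem.Str.slice s none (some i)) &&
        PySem.Set.contains S (PySem.Str.slice s (some i) none)) with
    | false => simp only [Bool.false_eq_true, if_false, Bool.false_or]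
    | true => simp only [if_true, Bool.true_or]

-- membership in B's composite set: exactly the concatenations of two nonempty input strings
theorem mem_composites_iff (strings : List String) (s : String) :
    (s ∈ PySem.Set.ofList
        ((PySem.Set.ofList (strings.filter (fun t => t != ""))).flatMap
          (fun a => (PySem.Set.ofList (strings.filter (fun t => t != ""))).map (fun b => a ++ b)))) ↔
      ∃ a ∈ strings, ∃ b ∈ strings, a ≠ "" ∧ b ≠ "" ∧ s = a ++ b := by
  rw [PySem.Set.mem_ofList, List.mem_flatMap]
  constructor
  · rintro ⟨a, ha, hm⟩
    rw [List.mem_map] at hm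
    rcases hm with ⟨b, hb, rfl⟩
    rw [PySem.Set.mem_ofList, List.mem_filter] at ha hb
    exact ⟨a, ha.1, b, hb.1, by simpa using ha.2, by simpa using hb.2, rfl⟩
  · rintro ⟨a, ha, b, hb, hane, hbne, rfl⟩
    refine ⟨a, ?_, ?_⟩
    · rw [PySem.Set.mem_ofList, List.mem_filter]
      exact ⟨ha, by simpa using hane⟩
    · rw [List.mem_map]
      exact ⟨b, by rw [PySem.Set.mem_ofList, List.mem_filter]; exact ⟨hb, by simpa using hbne⟩, rfl⟩

-- the per-string tests agree: a split position in range(1, len(s)) with both parts in the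
-- set exists iff s is a concatenation of two nonempty input strings
theorem split_iff_concat (strings : List String) (s : String) :
    pvSplitLoop (PySem.Set.ofList strings) s (PySem.List.pyRange 1 (PySem.Str.len s) 1) =
      PySem.Set.contains
        (PySem.Set.ofList
          ((PySem.Set.ofList (strings.filter (fun t => t != ""))).flatMap
            (fun a => (PySem.Set.ofList (strings.filter (fun t => t != ""))).map (fun b => a ++ b))))
        s := by
  rw [pvSplitLoop_eq_any]
  rw [show PySem.Set.contains
        (PySem.Set.ofList
          ((PySem.Set.ofList (strings.filter (fun t => t != ""))).flatMap
            (fun a => (PySem.Set.ofList (strings.filter (fun t => t != ""))).map (fun b => a ++ b))))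
        s =
      decide (∃ a ∈ strings, ∃ b ∈ strings, a ≠ "" ∧ b ≠ "" ∧ s = a ++ b) by
    by_cases h : ∃ a ∈ strings, ∃ b ∈ strings, a ≠ "" ∧ b ≠ "" ∧ s = a ++ b
    · rw [decide_eq_true h]
      rw [PySem.Set.contains_iff]
      exact (mem_composites_iff strings s).mpr h
    · rw [decide_eq_false h]
      rw [← Bool.not_eq_true, PySem.Set.contains_iff]
      exact fun hm => h ((mem_composites_iff strings s).mp hm)]
  cases hA : ((PySem.List.pyRange 1 (PySem.Str.len s) 1).any (fun i =>
      PySem.Set.contains (PySem.Set.ofList strings) (PySem.Str.slice s none (some i)) &&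
      PySem.Set.contains (PySem.Set.ofList strings) (PySem.Str.slice s (some i) none))) with
  | true =>
    rw [List.any_eq_true] at hA
    rcases hA with ⟨i, hi, hcond⟩
    rw [PySem.List.mem_pyRange_one] at hi
    rw [Bool.and_eq_true, PySem.Set.contains_iff, PySem.Set.contains_iff,
        PySem.Set.mem_ofList, PySem.Set.mem_ofList] at hcond
    rw [eq_comm, decide_eq_true_eq]
    have hlen : PySem.Str.len s = (s.toList.length : Int) := PySem.Str.len_eq s
    have h0 : (0:Int) ≤ i := by omega
    have hL : (PySem.Str.slice s none (some i)).toList = s.toList.take i.toNat := by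
      rw [PySem.Str.toList_slice, PySem.Chars.slice_eq_listSlice, PySem.List.slice_to _ h0]
    have hR : (PySem.Str.slice s (some i) none).toList = s.toList.drop i.toNat := by
      rw [PySem.Str.toList_slice, PySem.Chars.slice_eq_listSlice, PySem.List.slice_from _ h0]
    refine ⟨PySem.Str.slice s none (some i), hcond.1,
            PySem.Str.slice s (some i) none, hcond.2, ?_, ?_, ?_⟩
    · intro hemp
      have ht : s.toList.take i.toNat = [] := by rw [← hL, hemp]; rfl
      rw [List.take_eq_nil_iff] at ht
      rw [hlen] at hi
      rcases ht with h | h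
      · omega
      · rw [h] at hi; simp at hi; omega
    · intro hemp
      have hd : s.toList.drop i.toNat = [] := by rw [← hR, hemp]; rfl
      rw [List.drop_eq_nil_iff] at hd
      rw [hlen] at hi
      omega
    · apply String.toList_inj.mp
      rw [String.toList_append, hL, hR, List.take_append_drop]
  | false =>
    rw [List.any_eq_false] at hA
    rw [eq_comm, decide_eq_false_iff_not]
    rintro ⟨a, ha, b, hb, hane, hbne, rfl⟩
    have hale : a.toList ≠ [] := fun h => hane (String.toList_eq_nil_iff.mp h)
    have hble : b.toList ≠ [] := fun h => hbne (String.toList_eq_nil_iff.mp h)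
    have hap : 0 < a.toList.length := List.length_pos_iff.mpr hale
    have hbp : 0 < b.toList.length := List.length_pos_iff.mpr hble
    set i : Int := (a.toList.length : Int) with hi
    have hlen : PySem.Str.len (a ++ b) = ((a.toList.length + b.toList.length : Nat) : Int) := by
      rw [PySem.Str.len_eq, String.toList_append, List.length_append]
    have hmem : i ∈ PySem.List.pyRange 1 (PySem.Str.len (a ++ b)) 1 := by
      rw [PySem.List.mem_pyRange_one, hlen]
      constructor <;> omega
    have := hA i hmem
    have hL : PySem.Str.slice (a ++ b) none (some i) = a := by
      apply String.toList_inj.mp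
      rw [PySem.Str.toList_slice, PySem.Chars.slice_eq_listSlice,
          PySem.List.slice_to _ (by omega : (0:Int) ≤ i), String.toList_append]
      simp [hi]
    have hR : PySem.Str.slice (a ++ b) (some i) none = b := by
      apply String.toList_inj.mp
      rw [PySem.Str.toList_slice, PySem.Chars.slice_eq_listSlice,
          PySem.List.slice_from _ (by omega : (0:Int) ≤ i), String.toList_append]
      simp [hi]
    rw [hL, hR] at this
    have hca : PySem.Set.contains (PySem.Set.ofList ((a++b) :: strings).tail) a = true := by
      rw [PySem.Set.contains_iff, PySem.Set.mem_ofList]; simpa using ha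
    have hcb : PySem.Set.contains (PySem.Set.ofList ((a++b) :: strings).tail) b = true := by
      rw [PySem.Set.contains_iff, PySem.Set.mem_ofList]; simpa using hb
    simp only [List.tail_cons] at hca hcb
    rw [hca, hcb] at this
    simp at this

-- ===== VERDICT (by name: the statement is the Claim_ definition above) =====
theorem double_string_v3_spec : Claim_equal_double_string_v3 := by
  intro strings _
  unfold Spec_double_string_v3 double_string_v3 double_string_v3_alt
  simp only []
  rw [PySem.List.foldl_count_if
      (fun s => pvSplitLoop (PySem.Set.ofList strings) s (PySem.List.pyRange 1 (PySem.Str.len s) 1))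
      strings 0]
  rw [zero_add]
  norm_cast
  apply List.countP_congr
  intro s _
  rw [split_iff_concat strings s]
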